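-- pv_equiv track=rewrite | github.com/Pickledtezcat/vinland_game | old_builder.py | split_string_in_lines
-- ===== SOURCE A (Python) =====
-- def split_string_in_lines(contents, line_length):
--     words = contents.split()
--
--     new_contents = ""
--
--     word_count = 0
--
--     for word in words:
--         if word_count != 0:
--             new_contents = "{} ".format(new_contents)
--
--         new_contents = "{}{}".format(new_contents, word)
--
--         if word_count >= line_length:
--             new_contents = "{}\n".format(new_contents)
--             word_count = 0
--         else:
--             word_count += 1
--
--     return new_contents
-- ===== SOURCE B (Python) =====
-- def split_string_in_lines(contents, line_length):
--     words = contents.split()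
--     size = max(line_length + 1, 1)
--     pieces = []
--     for i in range(0, len(words), size):
--         chunk = words[i:i + size]
--         piece = " ".join(chunk)
--         if len(chunk) == size:
--             piece += "\n"
--         pieces.append(piece)
--     return "".join(pieces)
-- ===== Notes on version B (the rewrite author's own statement) =====
-- stated objective: simpler
-- what changed: Replaces the word-by-word accumulator loop with a stateful counter by slicing the word list into chunks of max(line_length+1,1) words and joining each chunk with spaces, appending a newline only after full chunks.
import Mathlib
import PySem

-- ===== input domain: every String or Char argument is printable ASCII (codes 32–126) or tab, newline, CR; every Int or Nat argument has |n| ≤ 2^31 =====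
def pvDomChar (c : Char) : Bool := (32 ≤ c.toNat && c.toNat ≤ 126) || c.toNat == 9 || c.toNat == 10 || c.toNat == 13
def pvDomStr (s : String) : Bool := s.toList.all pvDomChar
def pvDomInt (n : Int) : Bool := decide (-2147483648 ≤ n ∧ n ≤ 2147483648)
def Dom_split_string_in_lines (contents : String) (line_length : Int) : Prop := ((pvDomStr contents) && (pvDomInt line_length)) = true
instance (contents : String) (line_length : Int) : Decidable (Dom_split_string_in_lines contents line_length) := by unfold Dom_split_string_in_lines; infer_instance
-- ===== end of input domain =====

-- B replaces A's word-by-word accumulator loop (with its wrap-around counter) by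
-- slicing the word list into chunks of max(line_length+1, 1) words, joining each
-- chunk with spaces and appending '\n' only after full chunks (objective: simpler).

-- ===== PORT A =====
-- the accumulator is kept as List Char (PySem.Chars side); "{} ".format / "{}{}".format
-- are the concatenations written out
def split_string_in_lines (contents : String) (line_length : Int) : String :=
  let words := PySem.Chars.split₀ contents.toList
  let r := words.foldl (fun (st : List Char × Int) word =>
    let nc := if st.2 ≠ 0 then st.1 ++ [' '] else st.1
    let nc := nc ++ word
    if line_length ≤ st.2 then (nc ++ ['\n'], 0) else (nc, st.2 + 1)) ([], 0)
  String.ofList r.1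

-- ===== PORT B =====
-- words[i:i+size] for i in range(0, len(words), size): consecutive chunks of `size` words
def pvChunksB {α : Type} (size : Nat) : List α → List (List α)
  | [] => []
  | w :: ws => (w :: ws.take (size - 1)) :: pvChunksB size (ws.drop (size - 1))
  termination_by ws => ws.length
  decreasing_by simp

def split_string_in_lines_alt (contents : String) (line_length : Int) : String :=
  let words := PySem.Chars.split₀ contents.toList
  let size := (max (line_length + 1) 1).toNat
  let pieces := (pvChunksB size words).map (fun chunk =>
    PySem.Chars.join [' '] chunk ++ (if chunk.length = size then ['\n'] else []))
  String.ofList (PySem.Chars.join [] pieces)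

-- ===== PRECONDITION & SPEC =====
def Spec_split_string_in_lines (contents : String) (line_length : Int) (out : String) : Prop := out = split_string_in_lines_alt contents line_length
instance (contents : String) (line_length : Int) (out : String) : Decidable (Spec_split_string_in_lines contents line_length out) := by unfold Spec_split_string_in_lines; infer_instance

-- ===== CLAIM (what is proved, stated in full; the proofs are below) =====
def Claim_equal_split_string_in_lines : Prop := ∀ (contents : String) (line_length : Int), Dom_split_string_in_lines contents line_length → Spec_split_string_in_lines contents line_length (split_string_in_lines contents line_length)

-- ===== LEMMAS AND PROOFS =====

-- the text A's loop still appends when `k` words remain in the current line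
-- (k = size - word_count; a line break is written when the k-th word of the line lands)
def pvTail (size : Nat) (k : Nat) : List (List Char) → List Char
  | [] => []
  | w :: ws => (if k ≠ size then [' '] else []) ++ w ++
      (if k = 1 then '\n' :: pvTail size size ws else pvTail size (k - 1) ws)
  termination_by ws => ws.length
  decreasing_by all_goals simp

-- A's loop, from word count wc, appends exactly pvTail size (size - wc)
theorem pvFoldl_eq_tail (ll : Int) (size : Nat)
    (hsize : (size : Int) = max (ll + 1) 1) :
    ∀ (ws : List (List Char)) (wc : Int) (acc : List Char), 0 ≤ wc → wc ≤ (size : Int) - 1 →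
    (ws.foldl (fun (st : List Char × Int) word =>
      if ll ≤ st.2 then ((if st.2 ≠ 0 then st.1 ++ [' '] else st.1) ++ word ++ ['\n'], 0)
      else ((if st.2 ≠ 0 then st.1 ++ [' '] else st.1) ++ word, st.2 + 1)) (acc, wc)).1
      = acc ++ pvTail size (size - wc.toNat) ws := by
  intro ws
  induction ws with
  | nil => intro wc acc _ _; simp [pvTail]
  | cons w ws ih =>
    intro wc acc h0 h1
    have hmax : (0 ≤ ll ∧ (size : Int) = ll + 1) ∨ (ll < 0 ∧ (size : Int) = 1) := by omega
    rw [List.foldl_cons]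
    rw [pvTail]
    by_cases hbr : ll ≤ wc
    · have hk1 : size - wc.toNat = 1 := by omega
      rw [if_pos hbr, hk1, if_pos rfl]
      rw [ih 0 _ le_rfl (by omega)]
      simp only [Int.toNat_zero, Nat.sub_zero]
      by_cases hwc : wc ≠ 0
      · have : (1 : Nat) ≠ size := by omega
        simp [hwc, this]
      · have : (1 : Nat) = size := by omega
        simp [hwc, ← this]
    · have hk1 : size - wc.toNat ≠ 1 := by omega
      rw [if_neg hbr, if_neg hk1]
      rw [ih (wc + 1) _ (by omega) (by omega)]
      have : size - (wc + 1).toNat = size - wc.toNat - 1 := by omega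
      rw [this]
      by_cases hwc : wc ≠ 0
      · have : size - wc.toNat ≠ size := by omega
        simp [hwc, this]
      · have : size - wc.toNat = size := by omega
        simp [hwc, this]

-- unrolling pvTail over the first (at most) k words of the current line
theorem pvTail_unroll (size : Nat) (hsz : 1 ≤ size) :
    ∀ (ws : List (List Char)) (k : Nat), 1 ≤ k → k ≤ size →
    pvTail size k ws = (if k ≠ size ∧ ws ≠ [] then [' '] else []) ++
      PySem.Chars.join [' '] (ws.take k) ++
      (if k ≤ ws.length then '\n' :: pvTail size size (ws.drop k) else []) := by
  intro ws
  induction ws with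
  | nil =>
    intro k hk1 hks
    rw [pvTail]
    have hk0 : ¬ (k = 0) := by omega
    simp [hk0, PySem.Chars.join_nil]
  | cons w ws ih =>
    intro k hk1 hks
    rw [pvTail]
    by_cases h1 : k = 1
    · subst h1
      have hlen : (1 ≤ (w :: ws).length) := by simp
      simp only [if_pos hlen, List.take_succ_cons, List.take_zero,
        List.drop_succ_cons, List.drop_zero, PySem.Chars.join_singleton]
      by_cases hks1 : (1 : Nat) ≠ size <;> simp [hks1]
    · rw [if_neg h1, ih (k - 1) (by omega) (by omega)]
      have hne' : ((k - 1 ≠ size) ∧ ws ≠ []) ↔ (ws ≠ []) := by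
        constructor
        · exact fun h => h.2
        · exact fun h => ⟨by omega, h⟩
      cases ws with
      | nil =>
        have hta : (k - 1 ≤ ([] : List (List Char)).length) = False := by simp; omega
        have htb : (k ≤ (w :: ([] : List (List Char))).length) = False := by simp; omega
        have hk10 : ¬ (k - 1 = 0) := by omega
        have hkl1 : ¬ (k ≤ 1) := by omega
        have htw : List.take k [w] = [w] := List.take_of_length_le (by simp; omega)
        simp [hk10, hkl1, htw, PySem.Chars.join_nil, PySem.Chars.join_singleton]
      | cons x xs =>
        have htk : (w :: x :: xs).take k = w :: (x :: xs).take (k - 1) := by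
          cases k with
          | zero => omega
          | succ n => simp
        have hdk : (w :: x :: xs).drop k = (x :: xs).drop (k - 1) := by
          cases k with
          | zero => omega
          | succ n => simp
        rw [htk, hdk]
        obtain ⟨p, ps, hps⟩ : ∃ p ps, (x :: xs).take (k - 1) = p :: ps := by
          cases h : (x :: xs).take (k - 1) with
          | nil => rw [List.take_eq_nil_iff] at h; exfalso; rcases h with h | h; omega; simp at h
          | cons p ps => exact ⟨p, ps, rfl⟩
        rw [hps, PySem.Chars.join_cons_cons]
        have hlen : (k ≤ (w :: x :: xs).length) = (k - 1 ≤ (x :: xs).length) := by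
          simp only [eq_iff_iff, List.length_cons]; omega
        simp only [hlen]
        simp [show k - 1 ≠ size from by omega, List.append_assoc]

-- B's chunked join equals pvTail started at a fresh line
theorem pvChunks_eq_tail (size : Nat) (hsz : 1 ≤ size) :
    ∀ (ws : List (List Char)),
    PySem.Chars.join [] ((pvChunksB size ws).map (fun chunk =>
      PySem.Chars.join [' '] chunk ++ (if chunk.length = size then ['\n'] else [])))
      = pvTail size size ws := by
  intro ws
  induction hws : ws.length using Nat.strong_induction_on generalizing ws with
  | _ n ih =>
    cases ws with
    | nil => rw [pvChunksB, pvTail]; simp [PySem.Chars.join_nil]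
    | cons w ws =>
      rw [pvChunksB]
      have hjoin : ∀ (p : List Char) (ps : List (List Char)),
          PySem.Chars.join [] (p :: ps) = p ++ PySem.Chars.join [] ps := by
        intro p ps
        cases ps with
        | nil => simp [PySem.Chars.join_singleton, PySem.Chars.join_nil]
        | cons q qs => simp [PySem.Chars.join_cons_cons]
      rw [List.map_cons, hjoin]
      have hdrop : ws.drop (size - 1) = (w :: ws).drop size := by
        cases size with
        | zero => omega
        | succ n => simp
      have htake : w :: ws.take (size - 1) = (w :: ws).take size := by
        cases size with
        | zero => omega
        | succ n => simp
      rw [hdrop, htake,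
        ih ((w :: ws).drop size).length (by subst hws; simp; omega) _ rfl]
      rw [pvTail_unroll size hsz (w :: ws) size hsz le_rfl]
      have hlen : ((w :: ws).take size).length = size ↔ size ≤ (w :: ws).length := by
        rw [List.length_take]; omega
      by_cases hfull : size ≤ (w :: ws).length
      · simp only [if_pos hfull, hlen.mpr hfull]
        simp
      · have h2 : ¬ ((w :: ws).take size).length = size := fun h => hfull (hlen.mp h)
        simp only [if_neg hfull, if_neg h2]
        have h3 : (w :: ws).drop size = [] := by
          rw [List.drop_eq_nil_iff]; omega
        rw [h3, pvTail]
        simp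

-- ===== VERDICT (by name: the statement is the Claim_ definition above) =====
theorem split_string_in_lines_spec : Claim_equal_split_string_in_lines := by
  intro contents ll _
  unfold Spec_split_string_in_lines split_string_in_lines split_string_in_lines_alt
  simp only []
  set size := (max (ll + 1) 1).toNat with hsizedef
  have hsize : (size : Int) = max (ll + 1) 1 := by rw [hsizedef]; omega
  have hsz : 1 ≤ size := by omega
  have h := pvFoldl_eq_tail ll size hsize (PySem.Chars.split₀ contents.toList) 0 []
    le_rfl (by omega)
  simp only [Int.toNat_zero, Nat.sub_zero, List.nil_append] at h
  rw [h, pvChunks_eq_tail size hsz]
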